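-- pv_equiv track=rewrite | github.com/Wstoloah/minitorch-wstoloah | minitorch/tensor_data.py | strides_from_shape
-- ===== SOURCE A (Python) =====
-- from typing import Iterable, Optional, Sequence, Tuple, Union
-- from typing_extensions import TypeAlias
--
-- UserShape: TypeAlias = Sequence[int]
--
-- UserStrides: TypeAlias = Sequence[int]
--
-- def strides_from_shape(shape: UserShape) -> UserStrides:
--     """Compute the strides for a given tensor shape.
--
--     Strides define how many elements in memory you need to skip to move to the next element
--     in each dimension. For a contiguous array, this is calculated based on the product of
--     dimensions to the right of each axis.
--
--     Parameters
--     ----------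
--     shape : Sequence[int]
--         The shape of the tensor.
--
--     Returns
--     -------
--     tuple[int]
--         The computed strides corresponding to the shape.
--
--     """
--     layout = [
--         1
--     ]  # last dimension stride is always 1 (moving one step in last dimension moves 1 element)
--     offset = 1
--     for s in reversed(shape):
--         layout.append(s * offset)
--         offset = s * offset
--     # last stride removed: corresponds to moving beyond the entire tensor
--     return tuple(reversed(layout[:-1]))
-- ===== SOURCE B (Python) =====
-- def strides_from_shape(shape):
--     strides = []
--     for i in range(len(shape)):
--         stride = 1
--         for s in shape[i + 1:]:
--             stride *= s
--         strides.append(stride)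
--     return tuple(strides)
-- ===== Notes on version B (the rewrite author's own statement) =====
-- stated objective: alternative
-- what changed: Replaces A's single reversed accumulating sweep (running offset, append, drop last, reverse) by a per-axis recomputation: each stride is the product of the dimensions to its right, computed with a nested inner loop.
import Mathlib
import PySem

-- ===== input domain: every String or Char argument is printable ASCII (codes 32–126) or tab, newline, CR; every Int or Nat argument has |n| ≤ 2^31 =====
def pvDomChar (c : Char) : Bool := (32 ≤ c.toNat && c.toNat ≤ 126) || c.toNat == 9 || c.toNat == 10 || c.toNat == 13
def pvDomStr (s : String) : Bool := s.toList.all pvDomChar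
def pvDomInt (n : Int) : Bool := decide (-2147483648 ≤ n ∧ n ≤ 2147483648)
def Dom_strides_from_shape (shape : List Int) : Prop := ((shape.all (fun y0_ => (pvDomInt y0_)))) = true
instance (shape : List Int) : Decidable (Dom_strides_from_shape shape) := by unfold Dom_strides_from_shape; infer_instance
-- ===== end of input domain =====

-- B replaces A's single reversed accumulating sweep by a per-axis suffix-product recomputation
-- (nested loop); objective: alternative decomposition, not faster.

-- ===== PORT A =====
-- layout starts as [1]; for s in reversed(shape): layout.append(s*offset); offset = s*offset;
-- return tuple(reversed(layout[:-1]))  (layout is never empty, so [:-1] = dropLast)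
def strides_from_shape (shape : List Int) : List Int :=
  let p := shape.reverse.foldl
    (fun (st : List Int × Int) s => (st.1 ++ [s * st.2], s * st.2)) ([1], 1)
  (p.1.dropLast).reverse

-- ===== PORT B =====
-- for i in range(len(shape)): stride = 1; for s in shape[i+1:]: stride *= s; append
def strides_from_shape_alt (shape : List Int) : List Int :=
  (List.range shape.length).map
    (fun i => (shape.drop (i + 1)).foldl (fun stride s => stride * s) 1)

-- ===== PRECONDITION & SPEC =====
def Spec_strides_from_shape (shape : List Int) (out : List Int) : Prop := out = strides_from_shape_alt shape
instance (shape : List Int) (out : List Int) : Decidable (Spec_strides_from_shape shape out) := by unfold Spec_strides_from_shape; infer_instance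

-- ===== CLAIM (what is proved, stated in full; the proofs are below) =====
def Claim_equal_strides_from_shape : Prop := ∀ (shape : List Int), Dom_strides_from_shape shape → Spec_strides_from_shape shape (strides_from_shape shape)

-- ===== LEMMAS AND PROOFS =====

-- reference: suffix products, and the right-fold product
def pvProd : List Int → Int
  | [] => 1
  | s :: t => s * pvProd t

def pvSP : List Int → List Int
  | [] => []
  | _ :: t => pvProd t :: pvSP t

theorem pvFoldl_mul (l : List Int) (a : Int) :
    l.foldl (fun stride s => stride * s) a = a * pvProd l := by
  induction l generalizing a with
  | nil => simp [pvProd]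
  | cons s t ih => simp [List.foldl, pvProd, ih (a * s)]; ring

theorem pvA_pair (l : List Int) :
    l.reverse.foldl (fun (st : List Int × Int) s => (st.1 ++ [s * st.2], s * st.2)) ([1], 1)
      = ((pvProd l :: pvSP l).reverse, pvProd l) := by
  induction l with
  | nil => simp [pvProd, pvSP]
  | cons s t ih =>
    simp only [List.reverse_cons, List.foldl_append, ih, List.foldl_cons, List.foldl_nil,
      pvProd, pvSP, List.reverse_cons]

theorem pvA_eq_sp (l : List Int) : strides_from_shape l = pvSP l := by
  show (((l.reverse.foldl
    (fun (st : List Int × Int) s => (st.1 ++ [s * st.2], s * st.2)) ([1], 1)).1.dropLast)).reverse = pvSP l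
  rw [pvA_pair]
  simp [List.reverse_cons]

theorem pvB_eq_sp (l : List Int) : strides_from_shape_alt l = pvSP l := by
  induction l with
  | nil => simp [strides_from_shape_alt, pvSP]
  | cons s t ih =>
    simp only [strides_from_shape_alt, pvSP, List.length_cons, List.range_succ_eq_map,
      List.map_cons, List.map_map, List.drop_succ_cons] at *
    congr 1
    simp [pvFoldl_mul]

-- ===== VERDICT (by name: the statement is the Claim_ definition above) =====
theorem strides_from_shape_spec : Claim_equal_strides_from_shape := by
  intro shape _
  unfold Spec_strides_from_shape
  rw [pvA_eq_sp, pvB_eq_sp]
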